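-- pv_equiv track=rewrite | github.com/RongqingYuan/RBM | RBM/compute_json.py | cluster_chains
-- ===== SOURCE A (Python) =====
-- def identical_in_overlap(seq1, seq2, threshold=0.99):
--     common = set(seq1.keys()) & set(seq2.keys())
--     if not common:
--         return False
--     identity = sum(1 for r in common if seq1[r] == seq2[r]) / len(common)
--     return identity >= threshold
--
-- def cluster_chains(sequences):
--     chains = sorted(sequences.keys())
--     clusters = []
--     assigned = set()
--
--     for chain in chains:
--         if chain in assigned:
--             continue
--         cluster = [chain]
--         assigned.add(chain)
--         for other in chains:
--             if other not in assigned and identical_in_overlap(sequences[chain], sequences[other]):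
--                 cluster.append(other)
--                 assigned.add(other)
--         clusters.append(cluster)
--
--     return clusters
-- ===== SOURCE B (Python) =====
-- def identical_in_overlap(seq1, seq2, threshold=0.99):
--     common = set(seq1.keys()) & set(seq2.keys())
--     if not common:
--         return False
--     identity = sum(1 for r in common if seq1[r] == seq2[r]) / len(common)
--     return identity >= threshold
--
-- def cluster_chains(sequences):
--     clusters = []  # (seed, members) pairs, in creation order
--     for chain in sorted(sequences):
--         for seed, members in clusters:
--             if identical_in_overlap(sequences[seed], sequences[chain]):
--                 members.append(chain)
--                 break
--         else:
--             clusters.append((chain, []))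
--     return [[seed] + members for seed, members in clusters]
-- ===== Notes on version B (the rewrite author's own statement) =====
-- stated objective: simpler
-- what changed: A keeps an 'assigned' set and, for every new seed, rescans the whole chain list to collect its matches; B makes one pass over the sorted chains, filing each chain into the first existing cluster whose seed matches (else opening a new cluster), so the assigned set and the inner rescan disappear.
import Mathlib
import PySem

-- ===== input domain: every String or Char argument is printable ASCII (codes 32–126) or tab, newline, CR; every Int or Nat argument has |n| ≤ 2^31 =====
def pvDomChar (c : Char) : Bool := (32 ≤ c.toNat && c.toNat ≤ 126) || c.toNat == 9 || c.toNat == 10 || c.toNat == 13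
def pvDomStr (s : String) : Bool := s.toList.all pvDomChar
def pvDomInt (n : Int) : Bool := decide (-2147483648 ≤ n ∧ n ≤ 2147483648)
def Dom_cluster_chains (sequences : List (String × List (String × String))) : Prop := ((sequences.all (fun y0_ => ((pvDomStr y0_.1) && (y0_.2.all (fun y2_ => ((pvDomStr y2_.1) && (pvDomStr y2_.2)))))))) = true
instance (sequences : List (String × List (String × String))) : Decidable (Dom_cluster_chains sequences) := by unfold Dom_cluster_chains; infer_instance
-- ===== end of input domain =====

-- B replaces A's assigned-set + inner rescan of all chains by a single pass that files each
-- chain into the first cluster whose seed matches (objective: simpler decomposition).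


-- ===== PORT A =====
-- shared module helper identical_in_overlap (used verbatim by both A and B in Python).
-- Python compares the float count/len(common) with 0.99; the integer test 100*count ≥ 99*len
-- below gives the same Boolean (checked exhaustively for every count at every len ≤ 2*10^5,
-- far beyond any overlap the inputs here produce).  Iterating the set `common` only to count
-- matches, so the result does not depend on set order.
def identicalInOverlap (seq1 seq2 : List (String × String)) : Bool :=
  let d1 := PySem.Dict.mk seq1
  let d2 := PySem.Dict.mk seq2
  let common : PySem.Set String :=
    PySem.Set.inter (PySem.Set.ofList d1.keys) (PySem.Set.ofList d2.keys)
  if common.length = 0 then false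
  else decide (100 * (common.countP (fun r => d1.get? r == d2.get? r)) ≥ 99 * common.length)

-- sequences[a], sequences[b]: both calls receive keys of `sequences`, so the getD default is unreachable.
def simSeq (sequences : List (String × List (String × String))) (a b : String) : Bool :=
  identicalInOverlap ((PySem.Dict.mk sequences).getD a []) ((PySem.Dict.mk sequences).getD b [])

-- body of A's inner loop: `if other not in assigned and identical_in_overlap(...)`
def pvInner (g : String → String → Bool) (chain : String)
    (st : List String × PySem.Set String) (other : String) : List String × PySem.Set String :=
  if !(PySem.Set.contains st.2 other) && g chain other then
    (st.1 ++ [other], PySem.Set.add st.2 other)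
  else st

-- body of A's outer loop
def pvOuter (g : String → String → Bool) (chains : List String)
    (st : List (List String) × PySem.Set String) (chain : String) :
    List (List String) × PySem.Set String :=
  if PySem.Set.contains st.2 chain then st
  else
    let inner := chains.foldl (pvInner g chain) ([chain], PySem.Set.add st.2 chain)
    (st.1 ++ [inner.1], inner.2)

def cluster_chains (sequences : List (String × List (String × String))) : List (List String) :=
  let chains := PySem.List.sorted (PySem.Dict.mk sequences).keys (fun x => x) false
  (chains.foldl (pvOuter (simSeq sequences) chains) ([], PySem.Set.empty)).1

-- ===== PORT B =====
-- B's inner scan: file `chain` into the first cluster (seed, members) with a matching seed,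
-- else start a new cluster at the end.
def pvPlace (g : String → String → Bool) :
    List (String × List String) → String → List (String × List String)
  | [], chain => [(chain, [])]
  | (seed, members) :: rest, chain =>
      if g seed chain then (seed, members ++ [chain]) :: rest
      else (seed, members) :: pvPlace g rest chain

def cluster_chains_alt (sequences : List (String × List (String × String))) : List (List String) :=
  let chains := PySem.List.sorted (PySem.Dict.mk sequences).keys (fun x => x) false
  (chains.foldl (pvPlace (simSeq sequences)) []).map (fun q => q.1 :: q.2)

-- ===== PRECONDITION & SPEC =====
-- Pre_ excludes association lists with duplicate chain ids: those represent no Python dict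
-- (A's parameter is a dict, whose keys are unique), so nothing is claimed about them.
def Pre_cluster_chains (sequences : List (String × List (String × String))) : Prop :=
  (sequences.map Prod.fst).Nodup

instance (sequences : List (String × List (String × String))) : Decidable (Pre_cluster_chains sequences) := by
  unfold Pre_cluster_chains; infer_instance

def pvWitness_cluster_chains : (List (String × List (String × String))) :=
  [("b", [("1", "X")]), ("a", [("1", "X"), ("2", "Y")])]

def Spec_cluster_chains (sequences : List (String × List (String × String))) (out : List (List String)) : Prop := out = cluster_chains_alt sequences
instance (sequences : List (String × List (String × String))) (out : List (List String)) : Decidable (Spec_cluster_chains sequences out) := by unfold Spec_cluster_chains; infer_instance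

-- ===== CLAIM (what is proved, stated in full; the proofs are below) =====
def Claim_equal_cluster_chains : Prop := ∀ (sequences : List (String × List (String × String))), Dom_cluster_chains sequences → Pre_cluster_chains sequences → Spec_cluster_chains sequences (cluster_chains sequences)

-- ===== LEMMAS AND PROOFS =====

-- the common greedy clustering both loops compute on a duplicate-free chain list:
-- the first chain seeds a cluster with every later chain it matches; recurse on the rest.
def refC (g : String → String → Bool) : List String → List (String × List String)
  | [] => []
  | x :: xs =>
      (x, xs.filter (g x)) :: refC g (xs.filter (fun y => !(g x y)))
termination_by l => l.length
decreasing_by simpa using Nat.lt_succ_of_le (le_trans (List.length_filter_le _ _) (by simp))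

-- B's fold with a nonempty accumulator: the first cluster absorbs every match of its seed
theorem foldl_place_cons (g : String → String → Bool) (l : List String) :
    ∀ (s : String) (m : List String) (C : List (String × List String)),
      l.foldl (pvPlace g) ((s, m) :: C)
        = (s, m ++ l.filter (g s)) :: (l.filter (fun y => !(g s y))).foldl (pvPlace g) C := by
  induction l with
  | nil => intro s m C; simp
  | cons x xs ih =>
      intro s m C
      by_cases h : g s x = true
      · simp [pvPlace, h, ih]
      · simp only [Bool.not_eq_true] at h
        simp [pvPlace, h, ih]

theorem foldl_place_nil (g : String → String → Bool) :
    ∀ (n : Nat) (l : List String), l.length ≤ n →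
      l.foldl (pvPlace g) [] = refC g l := by
  intro n
  induction n with
  | zero =>
      intro l hl
      cases l with
      | nil => simp only [List.foldl_nil]; rw [refC]
      | cons x xs => simp at hl
  | succ n ih =>
      intro l hl
      cases l with
      | nil => simp only [List.foldl_nil]; rw [refC]
      | cons x xs =>
          rw [List.foldl_cons]
          show xs.foldl (pvPlace g) ((x, []) :: []) = _
          rw [foldl_place_cons, refC]
          simp only [List.nil_append]
          rw [ih]
          exact le_trans (List.length_filter_le _ _) (by simpa using hl)

-- A's inner loop over a duplicate-free list grabs exactly the unassigned matches, appending them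
theorem foldl_inner (g : String → String → Bool) (c : String) :
    ∀ (m : List String), m.Nodup → ∀ (cl S : List String),
      m.foldl (pvInner g c) (cl, S)
        = (cl ++ m.filter (fun y => !(PySem.Set.contains S y) && g c y),
           S ++ m.filter (fun y => !(PySem.Set.contains S y) && g c y)) := by
  intro m
  induction m with
  | nil => intro _ cl S; simp
  | cons x xs ih =>
      intro hnd cl S
      rcases List.nodup_cons.mp hnd with ⟨hx, hxs⟩
      have hcong : ∀ (S' : List String), x ∉ S' →
          xs.filter (fun y => !(PySem.Set.contains (S' ++ [x]) y) && g c y)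
            = xs.filter (fun y => !(PySem.Set.contains S' y) && g c y) := by
        intro S' _
        refine List.filter_congr ?_
        intro y hy
        have hyx : y ≠ x := fun h => hx (h ▸ hy)
        by_cases hmem : y ∈ S'
        · simp [PySem.Set.contains_eq_listContains, hmem]
        · simp [PySem.Set.contains_eq_listContains, hmem, hyx]
      by_cases hS : x ∈ S
      · rw [List.foldl_cons]
        have hstep : pvInner g c (cl, S) x = (cl, S) := by
          simp only [pvInner]
          rw [if_neg (by simp [PySem.Set.contains_eq_listContains, hS])]
        rw [hstep, ih hxs]
        have : xs.filter (fun y => !(PySem.Set.contains S y) && g c y)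
            = (x :: xs).filter (fun y => !(PySem.Set.contains S y) && g c y) := by
          simp [PySem.Set.contains_eq_listContains, hS]
        rw [this]
      · by_cases hg : g c x = true
        · rw [List.foldl_cons]
          have hstep : pvInner g c (cl, S) x = (cl ++ [x], S ++ [x]) := by
            simp only [pvInner]
            rw [if_pos (by simp [PySem.Set.contains_eq_listContains, hS, hg])]
            simp [PySem.Set.add_of_not_mem hS]
          rw [hstep, ih hxs, hcong S hS]
          simp [PySem.Set.contains_eq_listContains, hS, hg, List.append_assoc]
        · simp only [Bool.not_eq_true] at hg
          rw [List.foldl_cons]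
          have hstep : pvInner g c (cl, S) x = (cl, S) := by
            simp only [pvInner]
            rw [if_neg (by simp [hg])]
          rw [hstep, ih hxs]
          simp [hg]

-- A's outer loop on the remaining suffix r, with every chain of the prefix already assigned,
-- produces exactly the reference clustering of the still-unassigned part of r
theorem foldl_outer (g : String → String → Bool) (l : List String) (hl : l.Nodup) :
    ∀ (r pfx : List String), pfx ++ r = l →
      ∀ (cls : List (List String)) (S : List String), (∀ a ∈ pfx, a ∈ S) →
      (r.foldl (pvOuter g l) (cls, S)).1
        = cls ++ (refC g (r.filter (fun y => !(PySem.Set.contains S y)))).map (fun q => q.1 :: q.2) := by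
  intro r
  induction r with
  | nil => intro pfx _ cls S _; simp only [List.foldl_nil, List.filter_nil]; rw [refC]; simp
  | cons x r' ih =>
      intro pfx hsplit cls S hpfx
      have hsplit' : (pfx ++ [x]) ++ r' = l := by simpa [List.append_assoc] using hsplit
      by_cases hS : x ∈ S
      · rw [List.foldl_cons]
        have hstep : pvOuter g l (cls, S) x = (cls, S) := by
          simp only [pvOuter]
          rw [if_pos (by simp [PySem.Set.contains_eq_listContains, hS])]
        rw [hstep, ih (pfx ++ [x]) hsplit' cls S (by
          intro a ha
          rcases List.mem_append.mp ha with h | h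
          · exact hpfx a h
          · simp at h; exact h ▸ hS)]
        have : (x :: r').filter (fun y => !(PySem.Set.contains S y))
            = r'.filter (fun y => !(PySem.Set.contains S y)) := by
          simp [PySem.Set.contains_eq_listContains, hS]
        rw [this]
      · -- x is the next seed: x ∉ r', prefix elements differ from x and r'
        have hx_not_r' : x ∉ r' := by
          have hnd := hsplit ▸ hl
          have h2 := (List.nodup_append.mp hnd).2.1
          exact (List.nodup_cons.mp h2).1
        rw [List.foldl_cons]
        have haddx : PySem.Set.add S x = S ++ [x] := PySem.Set.add_of_not_mem hS
        have hinner := foldl_inner g x l hl [x] (S ++ [x])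
        -- the inner filter over l = pfx ++ x :: r' reduces to a filter over r'
        have hfl : l.filter (fun y => !(PySem.Set.contains (S ++ [x]) y) && g x y)
            = r'.filter (fun y => !(PySem.Set.contains S y) && g x y) := by
          rw [← hsplit, List.filter_append, List.filter_cons]
          have h1 : pfx.filter (fun y => !(PySem.Set.contains (S ++ [x]) y) && g x y) = [] := by
            refine List.filter_eq_nil_iff.mpr ?_
            intro a ha
            have haS : a ∈ S := hpfx a ha
            simp [PySem.Set.contains_eq_listContains, haS]
          have h3 : r'.filter (fun y => !(PySem.Set.contains (S ++ [x]) y) && g x y)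
              = r'.filter (fun y => !(PySem.Set.contains S y) && g x y) := by
            refine List.filter_congr ?_
            intro y hy
            have hyx : y ≠ x := fun h => hx_not_r' (h ▸ hy)
            by_cases hmem : y ∈ S
            · simp [PySem.Set.contains_eq_listContains, hmem]
            · simp [PySem.Set.contains_eq_listContains, hmem, hyx]
          rw [h1, h3]
          simp [PySem.Set.contains_eq_listContains]
        set T := r'.filter (fun y => !(PySem.Set.contains S y) && g x y) with hT
        have hstep : pvOuter g l (cls, S) x = (cls ++ [x :: T], (S ++ [x]) ++ T) := by
          simp only [pvOuter]
          rw [if_neg (by simp [PySem.Set.contains_eq_listContains, hS])]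
          show (cls ++ [(l.foldl (pvInner g x) ([x], PySem.Set.add S x)).1],
                (l.foldl (pvInner g x) ([x], PySem.Set.add S x)).2) = _
          rw [haddx, hinner, hfl]
          simp
        rw [hstep]
        rw [ih (pfx ++ [x]) hsplit' _ _ (by
          intro a ha
          rcases List.mem_append.mp ha with h | h
          · exact List.mem_append_left _ (List.mem_append_left _ (hpfx a h))
          · simp at h; subst h; exact List.mem_append_left _ (List.mem_append_right _ (by simp)))]
        have hmemT : ∀ y ∈ r', y ∉ S → (y ∈ T ↔ g x y = true) := by
          intro y hy hmem
          rw [hT, List.mem_filter]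
          constructor
          · intro ⟨_, h⟩; exact ((Bool.and_eq_true _ _).mp h).2
          · intro h
            exact ⟨hy, by simp [PySem.Set.contains_eq_listContains, hmem, h]⟩
        -- the chains left unassigned after x's pass are those unassigned before that x missed
        have hfilt : r'.filter (fun y => !(PySem.Set.contains ((S ++ [x]) ++ T) y))
            = (r'.filter (fun y => !(PySem.Set.contains S y))).filter (fun y => !(g x y)) := by
          rw [List.filter_filter]
          refine List.filter_congr ?_
          intro y hy
          have hyx : y ≠ x := fun h => hx_not_r' (h ▸ hy)
          by_cases hmem : y ∈ S
          · simp [PySem.Set.contains_eq_listContains, hmem]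
          · by_cases hg : g x y = true
            · have hyT : y ∈ T := (hmemT y hy hmem).mpr hg
              simp [PySem.Set.contains_eq_listContains, hmem, hg, hyT]
            · simp only [Bool.not_eq_true] at hg
              have hyT : y ∉ T := fun h => by
                have := (hmemT y hy hmem).mp h
                rw [hg] at this
                exact Bool.false_ne_true this
              simp [PySem.Set.contains_eq_listContains, hmem, hg, hyT, hyx]
        have hfx : (r'.filter (fun y => !(PySem.Set.contains S y))).filter (g x) = T := by
          rw [List.filter_filter, hT]
          exact List.filter_congr (fun y _ => by rw [Bool.and_comm])
        have hhead : (x :: r').filter (fun y => !(PySem.Set.contains S y))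
            = x :: r'.filter (fun y => !(PySem.Set.contains S y)) := by
          simp [PySem.Set.contains_eq_listContains, hS]
        rw [hhead, refC, hfilt, hfx]
        simp [List.append_assoc]

theorem generic_equal (g : String → String → Bool) (l : List String) (hl : l.Nodup) :
    (l.foldl (pvOuter g l) ([], PySem.Set.empty)).1
      = (l.foldl (pvPlace g) []).map (fun q => q.1 :: q.2) := by
  have hA := foldl_outer g l hl l [] rfl [] []
    (by intro a ha; simp at ha)
  have hfl : l.filter (fun y => !(PySem.Set.contains ([] : List String) y)) = l := by
    refine List.filter_eq_self.mpr ?_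
    intro a _
    simp [PySem.Set.contains_eq_listContains]
  have hB := foldl_place_nil g l.length l (le_refl _)
  rw [hfl] at hA
  rw [hB]
  simpa using hA

-- ===== VERDICT (by name: the statement is the Claim_ definition above) =====
theorem cluster_chains_spec : Claim_equal_cluster_chains := by
  intro sequences _ hpre
  unfold Spec_cluster_chains cluster_chains cluster_chains_alt
  have hnd : (PySem.List.sorted (PySem.Dict.mk sequences).keys (fun x => x) false).Nodup := by
    have hperm := PySem.List.sorted_perm (xs := (PySem.Dict.mk sequences).keys)
      (key := fun x => x) (rev := false)
    exact hperm.nodup_iff.mpr hpre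
  exact generic_equal (simSeq sequences) _ hnd
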